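-- pv_equiv track=rewrite | github.com/mjenks/AdventofCode2017 | day4.py | solve
-- ===== SOURCE A (Python) =====
-- def solve(puzzle_data):
--     count = 0
--     new_count = 0
--     for passphrase in puzzle_data:
--         if len(set(passphrase)) == len(passphrase):
--             count += 1
--             ordered = [''.join(sorted(x)) for x in passphrase]
--             if len(set(ordered)) == len(passphrase):
--                 new_count += 1
--     return count, new_count
-- ===== SOURCE B (Python) =====
-- def _has_adj_dup(ws):
--     for a, b in zip(ws, ws[1:]):
--         if a == b:
--             return True
--     return False
--
--
-- def solve(puzzle_data):
--     count = 0
--     new_count = 0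
--     for passphrase in puzzle_data:
--         if not _has_adj_dup(sorted(passphrase)):
--             count += 1
--             forms = sorted(''.join(sorted(w)) for w in passphrase)
--             if not _has_adj_dup(forms):
--                 new_count += 1
--     return count, new_count
-- ===== Notes on version B (the rewrite author's own statement) =====
-- stated objective: alternative
-- what changed: Per passphrase, uniqueness (of words and of char-sorted anagram forms) is decided by sorting the list and scanning for an adjacent equal pair, instead of comparing the size of a hash set with the list length.
import Mathlib
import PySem

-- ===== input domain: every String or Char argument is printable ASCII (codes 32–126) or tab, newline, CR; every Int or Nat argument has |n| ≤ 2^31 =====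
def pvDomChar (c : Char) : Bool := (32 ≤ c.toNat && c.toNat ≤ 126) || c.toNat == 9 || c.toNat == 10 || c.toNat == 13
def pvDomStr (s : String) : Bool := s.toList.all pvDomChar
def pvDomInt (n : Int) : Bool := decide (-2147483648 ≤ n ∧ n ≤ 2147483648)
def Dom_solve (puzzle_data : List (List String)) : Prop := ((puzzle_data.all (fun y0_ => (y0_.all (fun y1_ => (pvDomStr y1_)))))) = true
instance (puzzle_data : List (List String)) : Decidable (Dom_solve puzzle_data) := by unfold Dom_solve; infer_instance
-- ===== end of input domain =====

-- B replaces A's set-size uniqueness tests by sort-then-adjacent-equal-pair scans (alternative decomposition, same results).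

-- ===== PORT A =====
-- ''.join(sorted(x)) for a word x (used by both Pythons)
def sortWord (x : String) : String := String.ofList (PySem.List.sorted x.toList (fun c => c) false)

def solve (puzzle_data : List (List String)) : Int × Int :=
  puzzle_data.foldl
    (fun (st : Int × Int) passphrase =>
      if (PySem.Set.ofList passphrase).length = passphrase.length then
        let count := st.1 + 1
        let ordered := passphrase.map sortWord
        if (PySem.Set.ofList ordered).length = passphrase.length then
          (count, st.2 + 1)
        else
          (count, st.2)
      else st)
    (0, 0)

-- ===== PORT B =====
-- _has_adj_dup: scan for an adjacent equal pair
def hasAdjDup : List String → Bool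
  | a :: b :: t => if a == b then true else hasAdjDup (b :: t)
  | _ => false

def solveAltGo : List (List String) → Int → Int → Int × Int
  | [], count, new_count => (count, new_count)
  | passphrase :: rest, count, new_count =>
    if hasAdjDup (PySem.List.sorted passphrase (fun x => x) false) then
      solveAltGo rest count new_count
    else
      let forms := PySem.List.sorted (passphrase.map sortWord) (fun x => x) false
      if hasAdjDup forms then
        solveAltGo rest (count + 1) new_count
      else
        solveAltGo rest (count + 1) (new_count + 1)

def solve_alt (puzzle_data : List (List String)) : Int × Int :=
  solveAltGo puzzle_data 0 0

-- ===== PRECONDITION & SPEC =====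
def Spec_solve (puzzle_data : List (List String)) (out : Int × Int) : Prop := out = solve_alt puzzle_data
instance (puzzle_data : List (List String)) (out : Int × Int) : Decidable (Spec_solve puzzle_data out) := by unfold Spec_solve; infer_instance

-- ===== CLAIM (what is proved, stated in full; the proofs are below) =====
def Claim_equal_solve : Prop := ∀ (puzzle_data : List (List String)), Dom_solve puzzle_data → Spec_solve puzzle_data (solve puzzle_data)

-- ===== LEMMAS AND PROOFS =====

-- set(l) has the size of l exactly when l has no duplicates
theorem length_ofList_eq_iff {α : Type} [BEq α] [LawfulBEq α] (l : List α) :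
    (PySem.Set.ofList l).length = l.length ↔ l.Nodup := by
  induction l using List.reverseRecOn with
  | nil => simp [PySem.Set.ofList]
  | append_singleton xs x ih =>
    rw [PySem.Set.ofList_append_singleton, PySem.Set.add_eq_ite]
    by_cases hx : x ∈ PySem.Set.ofList xs
    · have hm : x ∈ xs := (PySem.Set.mem_ofList xs x).1 hx
      have hle := PySem.Set.length_ofList_le (xs := xs)
      have hnd : ¬ (xs ++ [x]).Nodup := by
        intro h
        rw [List.nodup_append] at h
        have h2 : ∀ a ∈ xs, ¬ a = x := by simpa using h.2.2
        exact h2 x hm rfl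
      simp only [hx, if_true, List.length_append, List.length_cons, List.length_nil]
      constructor
      · intro h; omega
      · intro h; exact (hnd h).elim
    · have hm : x ∉ xs := fun h => hx ((PySem.Set.mem_ofList xs x).2 h)
      have hnd : (xs ++ [x]).Nodup ↔ xs.Nodup := by
        rw [List.nodup_append]
        simp
        intro _ a ha he; exact hm (he ▸ ha)
      simp only [hx, if_false, List.length_append, List.length_cons, List.length_nil, hnd, ← ih]
      omega

-- hasAdjDup l = false ↔ adjacent elements all differ
theorem hasAdjDup_eq_false_iff (l : List String) :
    hasAdjDup l = false ↔ l.IsChain (· ≠ ·) := by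
  match l with
  | [] => simp [hasAdjDup]
  | [a] => simp [hasAdjDup]
  | a :: b :: t =>
    rw [hasAdjDup]
    by_cases h : a = b
    · simp [h]
    · simpa [h] using (hasAdjDup_eq_false_iff (b :: t))

-- a ≤-pairwise list whose neighbours all differ is <-pairwise
theorem pairwise_lt_of_pairwise_le_chain (l : List String)
    (hp : l.Pairwise (· ≤ ·)) (hc : l.IsChain (· ≠ ·)) : l.Pairwise (· < ·) := by
  match l with
  | [] => exact List.Pairwise.nil
  | [a] => simp
  | a :: b :: t =>
    have hp' := List.pairwise_cons.1 hp
    have htail := pairwise_lt_of_pairwise_le_chain (b :: t) hp'.2 (by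
      cases hc with
      | cons_cons _ h => exact h)
    have hab : a ≠ b := by cases hc with | cons_cons h _ => exact h
    have haleb : a ≤ b := hp'.1 b (by simp)
    refine List.pairwise_cons.2 ⟨?_, htail⟩
    intro c hcmem
    have hlt : a < b := lt_of_le_of_ne haleb hab
    rcases List.mem_cons.1 hcmem with rfl | hct
    · exact hlt
    · exact lt_of_lt_of_le hlt ((List.pairwise_cons.1 hp'.2).1 c hct)

-- the bridge: B's sorted-adjacent scan decides exactly A's set-size test
theorem hasAdjDup_sorted (l : List String) :
    hasAdjDup (PySem.List.sorted l (fun x => x) false) = false ↔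
      (PySem.Set.ofList l).length = l.length := by
  rw [length_ofList_eq_iff, hasAdjDup_eq_false_iff]
  have hperm : (PySem.List.sorted l (fun x => x) false).Perm l := PySem.List.sorted_perm l (fun x => x) false
  have hp : (PySem.List.sorted l (fun x => x) false).Pairwise (· ≤ ·) := by
    simpa using PySem.List.sorted_pairwise l (fun x => x)
  constructor
  · intro hc
    have := (pairwise_lt_of_pairwise_le_chain _ hp hc).imp (fun h => ne_of_lt h)
    exact hperm.nodup_iff.1 this
  · intro hnd
    have : (PySem.List.sorted l (fun x => x) false).Nodup := hperm.nodup_iff.2 hnd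
    exact this.isChain

theorem solveAltGo_eq (pd : List (List String)) (c n : Int) :
    solveAltGo pd c n =
      pd.foldl
        (fun (st : Int × Int) passphrase =>
          if (PySem.Set.ofList passphrase).length = passphrase.length then
            let count := st.1 + 1
            let ordered := passphrase.map sortWord
            if (PySem.Set.ofList ordered).length = passphrase.length then
              (count, st.2 + 1)
            else
              (count, st.2)
          else st)
        (c, n) := by
  induction pd generalizing c n with
  | nil => rfl
  | cons p rest ih =>
    rw [solveAltGo, List.foldl_cons]
    by_cases h1 : (PySem.Set.ofList p).length = p.length
    · have hb1 : hasAdjDup (PySem.List.sorted p (fun x => x) false) = false :=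
        (hasAdjDup_sorted p).2 h1
      by_cases h2 : (PySem.Set.ofList (p.map sortWord)).length = p.length
      · have h2' : (PySem.Set.ofList (p.map sortWord)).length = (p.map sortWord).length := by
          simpa using h2
        have hb2 : hasAdjDup (PySem.List.sorted (p.map sortWord) (fun x => x) false) = false :=
          (hasAdjDup_sorted _).2 h2'
        simp [hb1, hb2, h1, h2, ih]
      · have h2' : ¬ (PySem.Set.ofList (p.map sortWord)).length = (p.map sortWord).length := by
          simpa using h2
        have hb2 : ¬ hasAdjDup (PySem.List.sorted (p.map sortWord) (fun x => x) false) = false :=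
          fun hb => h2' ((hasAdjDup_sorted _).1 hb)
        simp [hb1, hb2, h1, h2, ih]
    · have hb1 : ¬ hasAdjDup (PySem.List.sorted p (fun x => x) false) = false :=
        fun hb => h1 ((hasAdjDup_sorted p).1 hb)
      simp [hb1, h1, ih]

-- ===== VERDICT (by name: the statement is the Claim_ definition above) =====
theorem solve_spec : Claim_equal_solve := by
  intro pd _
  unfold Spec_solve solve solve_alt
  rw [solveAltGo_eq]
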